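-- pv_equiv track=rewrite | github.com/hippyvm/hippyvm | hippy/module/general/funcs.py | canonicalize_version
-- ===== SOURCE A (Python) =====
-- def canonicalize_version(ver):
--     res = ""
--     last_char = None
--     for l in ver:
--         if l.isdigit():
--             if last_char and last_char.isalpha():
--                 res += "."
--             res += l
--         elif l in ("-", "_", "+"):
--             res += "."
--         elif l == ".":
--             res += l
--         else:
--             if not res.endswith(".") and (last_char and last_char.isdigit()):
--                 res += "." + l
--             else:
--                 res += l
--         last_char = l
--     return res
-- ===== SOURCE B (Python) =====
-- def canonicalize_version(ver):
--     def cls(c):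
--         if c.isdigit():
--             return 'd'
--         if c.isalpha():
--             return 'a'
--         if c in ('-', '_', '+'):
--             return 's'
--         if c == '.':
--             return '.'
--         return 'o'
--
--     # stage 1: split ver into maximal runs of characters of equal class
--     runs = []
--     for c in ver:
--         k = cls(c)
--         if runs and runs[-1][0] == k:
--             runs[-1][1].append(c)
--         else:
--             runs.append((k, [c]))
--
--     # stage 2: emit once per run, deciding the boundary dot from the previous run's class
--     out = []
--     prev = None
--     for k, chars in runs:
--         if k == 's':
--             out.append('.' * len(chars))
--         elif k == '.':
--             out.append(''.join(chars))
--         elif k == 'd':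
--             out.append(('.' if prev == 'a' else '') + ''.join(chars))
--         else:
--             out.append(('.' if prev == 'd' else '') + ''.join(chars))
--         prev = k
--     return ''.join(out)
-- ===== Notes on version B (the rewrite author's own statement) =====
-- stated objective: alternative
-- what changed: B replaces A's per-character accumulator loop (which re-inspects the accumulated result string) with a two-stage run-length decomposition: it first splits the input into maximal runs of equal character class, then emits once per run, deciding the boundary dot from the previous run's class.
import Mathlib
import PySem

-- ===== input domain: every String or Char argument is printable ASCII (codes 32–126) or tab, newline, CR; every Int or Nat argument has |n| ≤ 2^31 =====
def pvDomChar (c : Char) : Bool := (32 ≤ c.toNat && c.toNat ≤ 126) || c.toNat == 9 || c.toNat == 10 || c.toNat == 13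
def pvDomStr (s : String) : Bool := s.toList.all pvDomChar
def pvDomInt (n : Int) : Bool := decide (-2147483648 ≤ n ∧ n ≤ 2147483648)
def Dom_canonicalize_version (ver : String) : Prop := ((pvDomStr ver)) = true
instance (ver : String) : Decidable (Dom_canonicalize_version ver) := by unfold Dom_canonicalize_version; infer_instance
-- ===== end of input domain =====

-- B replaces A's per-character accumulator loop with a two-stage run-length decomposition
-- (split into maximal runs of equal character class, then emit once per run); same cost.

-- ===== PORT A =====
-- the for-loop over ver with state (res, last_char), transcribed branch for branch
def pvCanonLoop : List Char → List Char → Option Char → List Char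
  | [], res, _ => res
  | l :: rest, res, last =>
    if PySem.Chars.isdigit l then
      pvCanonLoop rest ((if last.elim false PySem.Chars.isalpha then res ++ ['.'] else res) ++ [l]) (some l)
    else if l = '-' ∨ l = '_' ∨ l = '+' then
      pvCanonLoop rest (res ++ ['.']) (some l)
    else if l = '.' then
      pvCanonLoop rest (res ++ [l]) (some l)
    else
      if !PySem.Chars.endswith res ['.'] && last.elim false PySem.Chars.isdigit then
        pvCanonLoop rest (res ++ ['.', l]) (some l)
      else
        pvCanonLoop rest (res ++ [l]) (some l)

def canonicalize_version (ver : String) : String :=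
  String.mk (pvCanonLoop ver.toList [] none)

-- ===== PORT B =====
-- cls(c): the five-way character classification
def pvCls (c : Char) : Char :=
  if PySem.Chars.isdigit c then 'd'
  else if PySem.Chars.isalpha c then 'a'
  else if c = '-' ∨ c = '_' ∨ c = '+' then 's'
  else if c = '.' then '.'
  else 'o'

-- stage 1 body: append c to the last run if its class matches, else start a new run
def pvPushRun : List (Char × List Char) → Char → Char → List (Char × List Char)
  | [], k, c => [(k, [c])]
  | [(k', cs)], k, c => if k' = k then [(k', cs ++ [c])] else [(k', cs), (k, [c])]
  | r :: rest, k, c => r :: pvPushRun rest k c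

-- stage 2 body: what one run (k, chars) contributes, given the previous run's class
def pvRunOut (prev : Option Char) (k : Char) (cs : List Char) : List Char :=
  if k = 's' then List.replicate cs.length '.'
  else if k = '.' then cs
  else if k = 'd' then (if prev = some 'a' then ['.'] else []) ++ cs
  else (if prev = some 'd' then ['.'] else []) ++ cs

-- stage 2 loop over the runs, threading prev
def pvEmit : List (Char × List Char) → Option Char → List Char
  | [], _ => []
  | (k, cs) :: t, prev => pvRunOut prev k cs ++ pvEmit t (some k)

def canonicalize_version_alt (ver : String) : String :=
  String.mk (pvEmit (ver.toList.foldl (fun rs c => pvPushRun rs (pvCls c) c) []) none)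

-- ===== PRECONDITION & SPEC =====
def Spec_canonicalize_version (ver : String) (out : String) : Prop := out = canonicalize_version_alt ver
instance (ver : String) (out : String) : Decidable (Spec_canonicalize_version ver out) := by unfold Spec_canonicalize_version; infer_instance

-- ===== CLAIM (what is proved, stated in full; the proofs are below) =====
def Claim_equal_canonicalize_version : Prop := ∀ (ver : String), Dom_canonicalize_version ver → Spec_canonicalize_version ver (canonicalize_version ver)

-- ===== LEMMAS AND PROOFS =====

-- the previous characters after which A's res ends with "."
def pvDotLast (p : Char) : Bool :=
  !PySem.Chars.isdigit p && (p == '-' || p == '_' || p == '+' || p == '.')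

-- per-character contribution keyed by the previous CHARACTER
def pvPiece (prev cur : Char) : List Char :=
  let k := pvCls cur
  if k = 's' ∨ k = '.' then ['.']
  else
    let p := pvCls prev
    if k = 'd' then (if p = 'a' then ['.', cur] else [cur])
    else (if p = 'd' then ['.', cur] else [cur])

def pvJoinP : Char → List Char → List Char
  | _, [] => []
  | p, c :: t => pvPiece p c ++ pvJoinP c t

-- per-character contribution keyed by the previous CLASS (none = start of string)
def pvPieceC (p : Option Char) (c : Char) : List Char :=
  let k := pvCls c
  if k = 's' ∨ k = '.' then ['.']
  else if k = 'd' then (if p = some 'a' then ['.', c] else [c])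
  else (if p = some 'd' then ['.', c] else [c])

def pvJoinC : Option Char → List Char → List Char
  | _, [] => []
  | p, c :: t => pvPieceC p c ++ pvJoinC (some (pvCls c)) t

-- class of the last run (prev if there is none)
def pvLastClass (rs : List (Char × List Char)) (prev : Option Char) : Option Char :=
  (rs.getLast?).elim prev (fun r => some r.1)

theorem pvClsDot (c : Char) (h : pvCls c = '.') : c = '.' := by
  unfold pvCls at h; split_ifs at h <;> first | assumption | exact absurd h (by decide)

theorem pvRunOutSnoc (prev : Option Char) (c : Char) (cs : List Char) :
    pvRunOut prev (pvCls c) (cs ++ [c]) = pvRunOut prev (pvCls c) cs ++ pvPieceC (some (pvCls c)) c := by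
  unfold pvRunOut pvPieceC
  by_cases hs : pvCls c = 's'
  · simp [hs, List.replicate_succ']
  · by_cases hdot : pvCls c = '.'
    · obtain rfl := pvClsDot c hdot
      simp [hdot]
    · by_cases hd : pvCls c = 'd'
      · simp [hs, hdot, hd]
      · simp [hs, hdot, hd]

theorem pvRunOutOne (prev : Option Char) (c : Char) :
    pvRunOut prev (pvCls c) [c] = pvPieceC prev c := by
  unfold pvRunOut pvPieceC
  by_cases hs : pvCls c = 's'
  · simp [hs]
  · by_cases hdot : pvCls c = '.'
    · obtain rfl := pvClsDot c hdot
      simp [hdot]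
    · by_cases hd : pvCls c = 'd'
      · by_cases hp : prev = some 'a' <;> simp [hs, hdot, hd, hp]
      · by_cases hp : prev = some 'd' <;> simp [hs, hdot, hd, hp]

theorem pvPushRunNeNil (k c : Char) : ∀ (rs : List (Char × List Char)), pvPushRun rs k c ≠ [] := by
  intro rs
  induction rs with
  | nil => simp [pvPushRun]
  | cons r t ih =>
    obtain ⟨k', cs'⟩ := r
    cases t with
    | nil => unfold pvPushRun; split_ifs <;> simp
    | cons r2 t2 => show ((k', cs') :: pvPushRun (r2 :: t2) k c) ≠ []; simp

theorem pvPushEmit (c : Char) : ∀ (rs : List (Char × List Char)) (prev : Option Char),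
    pvEmit (pvPushRun rs (pvCls c) c) prev
      = pvEmit rs prev ++ pvPieceC (pvLastClass rs prev) c := by
  intro rs
  induction rs with
  | nil =>
    intro prev
    simp only [pvPushRun, pvEmit, pvLastClass, List.getLast?_nil, Option.elim,
      List.append_nil, List.nil_append]
    exact pvRunOutOne prev c
  | cons r t ih =>
    intro prev
    obtain ⟨k', cs'⟩ := r
    cases t with
    | nil =>
      by_cases he : k' = pvCls c
      · subst he
        have hstep : pvPushRun [(pvCls c, cs')] (pvCls c) c = [(pvCls c, cs' ++ [c])] := by
          simp [pvPushRun]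
        rw [hstep]
        simp only [pvEmit, pvLastClass, List.getLast?_singleton, Option.elim, List.append_nil]
        exact pvRunOutSnoc prev c cs'
      · have hstep : pvPushRun [(k', cs')] (pvCls c) c = [(k', cs'), (pvCls c, [c])] := by
          simp [pvPushRun, he]
        rw [hstep]
        simp only [pvEmit, pvLastClass, List.getLast?_singleton, Option.elim,
          List.append_nil, List.append_assoc]
        rw [pvRunOutOne]
    | cons r2 t2 =>
      show pvEmit ((k', cs') :: pvPushRun (r2 :: t2) (pvCls c) c) prev = _
      obtain ⟨k2, cs2⟩ := r2
      simp only [pvEmit]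
      rw [ih (some k')]
      cases hgl : ((k2, cs2) :: t2).getLast? with
      | none => simp [List.getLast?_eq_none_iff] at hgl
      | some x =>
        unfold pvLastClass
        rw [List.getLast?_cons_cons, hgl]
        simp [pvEmit, hgl, List.append_assoc]

theorem pvPushLast (c : Char) : ∀ (rs : List (Char × List Char)) (prev : Option Char),
    pvLastClass (pvPushRun rs (pvCls c) c) prev = some (pvCls c) := by
  intro rs
  induction rs with
  | nil => intro prev; simp [pvPushRun, pvLastClass]
  | cons r t ih =>
    intro prev
    obtain ⟨k', cs'⟩ := r
    cases t with
    | nil =>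
      by_cases he : k' = pvCls c
      · subst he; simp [pvPushRun, pvLastClass]
      · simp [pvPushRun, he, pvLastClass, List.getLast?_cons_cons]
    | cons r2 t2 =>
      show pvLastClass ((k', cs') :: pvPushRun (r2 :: t2) (pvCls c) c) prev = _
      have h := ih (some k')
      obtain ⟨q, qs, hq⟩ := List.exists_cons_of_ne_nil (pvPushRunNeNil (pvCls c) c (r2 :: t2))
      unfold pvLastClass at h ⊢
      rw [hq] at h ⊢
      simpa [List.getLast?_cons_cons] using h

theorem pvFoldEmit : ∀ (cs : List Char) (rs : List (Char × List Char)) (prev : Option Char),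
    pvEmit (cs.foldl (fun rs c => pvPushRun rs (pvCls c) c) rs) prev
      = pvEmit rs prev ++ pvJoinC (pvLastClass rs prev) cs := by
  intro cs
  induction cs with
  | nil => intro rs prev; simp [pvJoinC]
  | cons c t ih =>
    intro rs prev
    simp only [List.foldl_cons, pvJoinC]
    rw [ih (pvPushRun rs (pvCls c) c) prev, pvPushEmit c rs prev, pvPushLast c rs prev,
      List.append_assoc]

theorem pvPieceEq (p c : Char) : pvPiece p c = pvPieceC (some (pvCls p)) c := by
  unfold pvPiece pvPieceC; simp

theorem pvJoinCP : ∀ (cs : List Char) (p : Char), pvJoinC (some (pvCls p)) cs = pvJoinP p cs := by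
  intro cs
  induction cs with
  | nil => intro p; rfl
  | cons c t ih => intro p; simp [pvJoinC, pvJoinP, pvPieceEq, ih]

theorem pvJoinCNone (cs : List Char) : pvJoinC none cs = pvJoinP (Char.ofNat 0) cs := by
  rw [← pvJoinCP]
  cases cs with
  | nil => rfl
  | cons c t =>
    simp only [pvJoinC]
    have : pvPieceC none c = pvPieceC (some (pvCls (Char.ofNat 0))) c := by
      have h0 : pvCls (Char.ofNat 0) = 'o' := by decide
      unfold pvPieceC; rw [h0]; simp
    rw [this]

theorem pvDigitFacts (c : Char) (h : PySem.Chars.isdigit c = true) :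
    PySem.Chars.isalpha c = false ∧ c ≠ '-' ∧ c ≠ '_' ∧ c ≠ '+' ∧ c ≠ '.' := by
  refine ⟨?_, ?_, ?_, ?_, ?_⟩
  · simp [PySem.Chars.isdigit, PySem.Chars.isalpha, PySem.Chars.isupper, PySem.Chars.islower,
      Char.le_def, UInt32.le_iff_toNat_le] at *
    omega
  all_goals (intro hE; subst hE; exact absurd h (by decide))

theorem pvEndswithConcat (res : List Char) (x y : Char) :
    PySem.Chars.endswith (res ++ [x]) [y] = (x == y) := by
  by_cases h : x = y
  · subst h
    simp only [beq_self_eq_true]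
    exact (PySem.Chars.endswith_iff _ _).mpr ⟨res, rfl⟩
  · have hns : ¬ ([y] <:+ res ++ [x]) := by
      rintro ⟨t, ht⟩
      have := congrArg List.getLast? ht
      simp at this
      exact h this.symm
    cases hb : PySem.Chars.endswith (res ++ [x]) [y] with
    | false => simp [beq_eq_false_iff_ne, h]
    | true => exact absurd ((PySem.Chars.endswith_iff _ _).mp hb) hns

theorem pvLoopEq (cs : List Char) : ∀ (res : List Char) (last : Option Char),
    PySem.Chars.endswith res ['.'] = last.elim false pvDotLast →
    pvCanonLoop cs res last = res ++ pvJoinP (last.elim (Char.ofNat 0) id) cs := by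
  induction cs with
  | nil => intro res last _; simp [pvCanonLoop, pvJoinP]
  | cons l t ih =>
    intro res last hinv
    by_cases hd : PySem.Chars.isdigit l = true
    · obtain ⟨hna, h1, h2, h3, h4⟩ := pvDigitFacts l hd
      have hpiece : ∀ p : Char,
          pvPiece p l = (if PySem.Chars.isalpha p = true then ['.'] else []) ++ [l] := by
        intro p
        by_cases hpa : PySem.Chars.isalpha p = true
        · have hpd : PySem.Chars.isdigit p = false := by
            cases hq : PySem.Chars.isdigit p with
            | false => rfl
            | true => exact absurd hpa (by simp [(pvDigitFacts p hq).1])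
          simp [pvPiece, pvCls, hd, h1, h2, h3, h4, hpa, hpd]
        · simp [pvPiece, pvCls, hd, h1, h2, h3, h4, hpa]
          split_ifs <;> decide
      have hinv' : ∀ r : List Char, PySem.Chars.endswith (r ++ [l]) ['.'] = pvDotLast l := by
        intro r; rw [pvEndswithConcat]; simp [pvDotLast, hd, beq_eq_false_iff_ne, h4]
      cases last with
      | none =>
        simp only [pvCanonLoop, hd, if_pos, Option.elim, if_false, Bool.false_eq_true]
        rw [ih (res ++ [l]) (some l) (hinv' res)]
        have : pvPiece (Char.ofNat 0) l = [l] := by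
          rw [hpiece]; simp [show PySem.Chars.isalpha (Char.ofNat 0) = false from by decide]
        simp [pvJoinP, this]
      | some p =>
        simp only [pvCanonLoop, hd, if_pos, Option.elim, id]
        by_cases hpa : PySem.Chars.isalpha p = true
        · rw [if_pos hpa, ih ((res ++ ['.']) ++ [l]) (some l) (hinv' _)]
          simp [pvJoinP, hpiece, hpa]
        · rw [if_neg hpa, ih (res ++ [l]) (some l) (hinv' _)]
          simp [pvJoinP, hpiece, hpa]
    · -- not a digit
      by_cases hs : l = '-' ∨ l = '_' ∨ l = '+'
      · have hpiece : ∀ p : Char, pvPiece p l = ['.'] := by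
          intro p
          have hla : PySem.Chars.isalpha l = false := by
            rcases hs with h | h | h <;> subst h <;> decide
          simp [pvPiece, pvCls, hd, hla, hs]
        have hinv' : PySem.Chars.endswith (res ++ ['.']) ['.'] = pvDotLast l := by
          rw [pvEndswithConcat]
          have hns : (l == '-' || l == '_' || l == '+' || l == '.') = true := by
            rcases hs with h | h | h <;> simp [h]
          simp [pvDotLast, hd, hns]
        simp only [pvCanonLoop, hd, if_neg, if_pos hs, Bool.false_eq_true]
        rw [ih (res ++ ['.']) (some l) hinv']
        cases last <;> simp [pvJoinP, hpiece]
      · by_cases hdot : l = '.'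
        · subst hdot
          have hpiece : ∀ p : Char, pvPiece p '.' = ['.'] := by
            intro p; simp [pvPiece, show pvCls '.' = '.' from by decide]
          have hinv' : PySem.Chars.endswith (res ++ ['.']) ['.'] = pvDotLast '.' := by
            rw [pvEndswithConcat]; decide
          simp only [pvCanonLoop, hd, hs, if_neg, if_pos, Bool.false_eq_true]
          rw [ih (res ++ ['.']) (some '.') hinv']
          cases last <;> simp [pvJoinP, hpiece]
        · -- the final else branch
          have hkl : pvCls l = (if PySem.Chars.isalpha l then 'a' else 'o') := by
            simp [pvCls, hd, hs, hdot]
          have hpiece : ∀ p : Char,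
              pvPiece p l = (if pvCls p = 'd' then ['.', l] else [l]) := by
            intro p; rw [pvPiece, hkl]; split <;> simp
          have hinv' : ∀ r : List Char, PySem.Chars.endswith (r ++ [l]) ['.'] = pvDotLast l := by
            intro r; rw [pvEndswithConcat]
            simp [pvDotLast, hd, hdot, beq_eq_false_iff_ne]
            rcases (not_or.mp hs) with ⟨a, bc⟩
            rcases (not_or.mp bc) with ⟨b, c⟩
            simp [a, b, c, hdot]
          cases last with
          | none =>
            simp only [pvCanonLoop, hd, hs, hdot, if_neg, Option.elim, Bool.and_false,
              Bool.false_eq_true, if_false]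
            rw [ih (res ++ [l]) (some l) (hinv' res)]
            have : pvPiece (Char.ofNat 0) l = [l] := by rw [hpiece]; simp [pvCls]; decide
            simp [pvJoinP, this]
          | some p =>
            simp only [pvCanonLoop, hd, hs, hdot, if_neg, Option.elim, id] at hinv ⊢
            by_cases hpd : PySem.Chars.isdigit p = true
            · have hdl : pvDotLast p = false := by simp [pvDotLast, hpd]
              rw [hinv, hdl]
              simp only [Bool.not_false, Bool.true_and, hpd, if_pos]
              have : res ++ ['.', l] = (res ++ ['.']) ++ [l] := by simp
              rw [this, ih ((res ++ ['.']) ++ [l]) (some l) (hinv' _)]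
              simp [pvJoinP, hpiece, pvCls, hpd]
            · simp only [hpd, Bool.and_false, Bool.false_eq_true, if_false]
              rw [ih (res ++ [l]) (some l) (hinv' _)]
              have : pvCls p ≠ 'd' := by
                simp [pvCls, hpd]
                split_ifs <;> decide
              simp [pvJoinP, hpiece, this]

-- ===== VERDICT (by name: the statement is the Claim_ definition above) =====
theorem canonicalize_version_spec : Claim_equal_canonicalize_version := by
  intro ver _
  unfold Spec_canonicalize_version canonicalize_version canonicalize_version_alt
  rw [pvLoopEq ver.toList [] none (by decide), pvFoldEmit ver.toList [] none]
  simp [pvEmit, pvLastClass, pvJoinCNone]
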